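-- pv_equiv track=rewrite | github.com/kaleoyster/nbi | nbi-utilities/nbi_data_chef.py | segmentize_column
-- ===== SOURCE A (Python) =====
-- def segmentize_column(data, indexes):
--     """
--     Description:
--         return the segmented data by the column
--     Return:
--         segmentedData (list)
--     """
--     segmentedData = list()
--     startP = 0
--     if len(indexes) != 0:
--         for indx in indexes:
--             tempList = list()
--             endP = indx + 1
--             segment = data[startP:endP]
--             remainder = data[endP:]
--             startP = endP
--             segmentedData.append(segment)
--         segmentedData.append(remainder)
--     else:
--         segmentedData.append(data)
--     return segmentedData
-- ===== SOURCE B (Python) =====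
-- def segmentize_column(data, indexes):
--     if not indexes:
--         return [data]
--     bounds = [0] + [i + 1 for i in indexes] + [len(data)]
--     return [data[a:b] for a, b in zip(bounds, bounds[1:])]
-- ===== Notes on version B (the rewrite author's own statement) =====
-- stated objective: simpler
-- what changed: Replaces A's running-pointer loop with leftover state (startP, a remainder recomputed and discarded every iteration) by building a boundary table [0]+[i+1 for i in indexes]+[len(data)] and slicing once per consecutive boundary pair.
import Mathlib
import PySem

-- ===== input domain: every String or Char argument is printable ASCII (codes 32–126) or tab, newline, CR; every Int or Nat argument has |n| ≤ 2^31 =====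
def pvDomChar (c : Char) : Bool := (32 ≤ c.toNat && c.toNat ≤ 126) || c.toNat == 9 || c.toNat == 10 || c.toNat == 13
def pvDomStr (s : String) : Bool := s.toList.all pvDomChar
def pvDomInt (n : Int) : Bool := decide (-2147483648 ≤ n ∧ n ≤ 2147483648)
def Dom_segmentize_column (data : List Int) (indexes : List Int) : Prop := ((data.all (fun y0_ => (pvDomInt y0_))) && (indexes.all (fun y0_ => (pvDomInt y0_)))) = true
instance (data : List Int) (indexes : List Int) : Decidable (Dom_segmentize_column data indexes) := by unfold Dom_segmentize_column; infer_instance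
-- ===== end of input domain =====

-- B replaces A's running-pointer loop (which recomputes a discarded remainder each step)
-- by a boundary table and one pairwise pass; objective: simpler, same cost.

-- ===== PORT A =====
-- state: (segmentedData, startP, remainder); remainder's initial [] is never used
-- (the `remainder` append only happens when indexes ≠ [], where the loop has set it).
def segmentize_column (data : List Int) (indexes : List Int) : List (List Int) :=
  if indexes.length ≠ 0 then
    let st := indexes.foldl
      (fun (st : List (List Int) × Int × List Int) indx =>
        let endP := indx + 1
        let segment := PySem.List.slice data (some st.2.1) (some endP)
        let remainder := PySem.List.slice data (some endP) none
        (st.1 ++ [segment], endP, remainder))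
      ([], 0, [])
    st.1 ++ [st.2.2]
  else [data]

-- ===== PORT B =====
def segmentize_column_alt (data : List Int) (indexes : List Int) : List (List Int) :=
  if indexes = [] then [data]
  else
    let bounds : List Int := 0 :: (indexes.map (· + 1) ++ [(data.length : Int)])
    (bounds.zip bounds.tail).map (fun p => PySem.List.slice data (some p.1) (some p.2))

-- ===== PRECONDITION & SPEC =====
def Spec_segmentize_column (data : List Int) (indexes : List Int) (out : List (List Int)) : Prop := out = segmentize_column_alt data indexes
instance (data : List Int) (indexes : List Int) (out : List (List Int)) : Decidable (Spec_segmentize_column data indexes out) := by unfold Spec_segmentize_column; infer_instance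

-- ===== CLAIM (what is proved, stated in full; the proofs are below) =====
def Claim_equal_segmentize_column : Prop := ∀ (data : List Int) (indexes : List Int), Dom_segmentize_column data indexes → Spec_segmentize_column data indexes (segmentize_column data indexes)

-- ===== LEMMAS AND PROOFS =====

-- common reference shape: the segments cut at i+1 starting from s, plus the tail
def segRec (data : List Int) (s : Int) : List Int → List (List Int)
  | [] => [PySem.List.slice data (some s) none]
  | i :: rest => PySem.List.slice data (some s) (some (i + 1)) :: segRec data (i + 1) rest

-- a slice whose stop is the full length equals the open-ended slice
theorem slice_stop_len (xs : List Int) (a : Int) :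
    PySem.List.slice xs (some a) (some (xs.length : Int)) = PySem.List.slice xs (some a) none := by
  simp [PySem.List.slice, PySem.List.clampIdx]
  split_ifs <;> omega

theorem foldA_eq_segRec (data : List Int) (idxs : List Int) :
    ∀ (acc : List (List Int)) (s : Int) (r : List Int), idxs ≠ [] →
    (let st := idxs.foldl
      (fun (st : List (List Int) × Int × List Int) indx =>
        (st.1 ++ [PySem.List.slice data (some st.2.1) (some (indx + 1))], indx + 1,
          PySem.List.slice data (some (indx + 1)) none))
      (acc, s, r)
     st.1 ++ [st.2.2]) = acc ++ segRec data s idxs := by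
  induction idxs with
  | nil => intro _ _ _ h; exact absurd rfl h
  | cons i rest ih =>
    intro acc s r _
    cases rest with
    | nil => simp [segRec]
    | cons j rest' =>
      have := ih (acc ++ [PySem.List.slice data (some s) (some (i + 1))]) (i + 1)
        (PySem.List.slice data (some (i + 1)) none) (by simp)
      simpa [segRec, List.foldl_cons, List.append_assoc] using this

theorem boundsB_eq_segRec (data : List Int) (idxs : List Int) :
    ∀ (s : Int),
    (((s :: (idxs.map (· + 1) ++ [(data.length : Int)])).zip
        ((idxs.map (· + 1) ++ [(data.length : Int)]))).map
      (fun p => PySem.List.slice data (some p.1) (some p.2))) = segRec data s idxs := by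
  induction idxs with
  | nil => intro s; simp [segRec, slice_stop_len]
  | cons i rest ih => intro s; simpa [segRec] using ih (i + 1)

-- ===== VERDICT (by name: the statement is the Claim_ definition above) =====
theorem segmentize_column_spec : Claim_equal_segmentize_column := by
  intro data indexes _
  unfold Spec_segmentize_column segmentize_column segmentize_column_alt
  by_cases h : indexes = []
  · simp [h]
  · simp only [h, if_neg, List.length_eq_zero_iff, ne_eq, not_false_iff, if_true]
    have hA := foldA_eq_segRec data indexes [] 0 [] h
    have hB := boundsB_eq_segRec data indexes 0
    simp only [List.nil_append] at hA
    rw [hA]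
    simp only [List.tail_cons] at hB ⊢
    rw [hB]
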